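-- pv_equiv track=rewrite | github.com/xingyaner/Agentless | agentless/util/preprocess_data.py | line_wrap_content
-- ===== SOURCE A (Python) =====
-- def line_wrap_content(content, context_intervals=None, no_line_number=False, **kwargs):
--     """为代码添加行号，便于模型定位"""
--     lines = content.split("\n")
--     if not context_intervals:
--         context_intervals = [(1, len(lines))]
--
--     new_lines = []
--     for start, end in context_intervals:
--         for i in range(max(0, start-1), min(len(lines), end)):
--             prefix = f"{i+1}|" if not no_line_number else ""
--             new_lines.append(f"{prefix}{lines[i]}")
--     return "\n".join(new_lines)
-- ===== SOURCE B (Python) =====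
-- def line_wrap_content(content, context_intervals=None, no_line_number=False, **kwargs):
--     """Pair each line with its number via enumerate, pick pairs per interval by
--     recursive slicing, and format only at join time."""
--     lines = content.split("\n")
--     pairs = list(enumerate(lines, 1))
--
--     def pick(ivs):
--         if not ivs:
--             return []
--         (s, e) = ivs[0]
--         return pairs[max(0, s - 1):max(0, min(len(pairs), e))] + pick(ivs[1:])
--
--     chosen = pick(context_intervals) if context_intervals else pairs
--     if no_line_number:
--         return "\n".join(line for _, line in chosen)
--     return "\n".join(f"{n}|{line}" for n, line in chosen)
-- ===== Notes on version B (the rewrite author's own statement) =====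
-- stated objective: alternative
-- what changed: B pairs each line with its 1-based number once via enumerate, selects the pairs with a recursive per-interval slicing function (no index loop, no per-element formatting during selection), and applies the number/plain formatting only in the final join; A formats each element inside a nested per-interval index loop.
import Mathlib
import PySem

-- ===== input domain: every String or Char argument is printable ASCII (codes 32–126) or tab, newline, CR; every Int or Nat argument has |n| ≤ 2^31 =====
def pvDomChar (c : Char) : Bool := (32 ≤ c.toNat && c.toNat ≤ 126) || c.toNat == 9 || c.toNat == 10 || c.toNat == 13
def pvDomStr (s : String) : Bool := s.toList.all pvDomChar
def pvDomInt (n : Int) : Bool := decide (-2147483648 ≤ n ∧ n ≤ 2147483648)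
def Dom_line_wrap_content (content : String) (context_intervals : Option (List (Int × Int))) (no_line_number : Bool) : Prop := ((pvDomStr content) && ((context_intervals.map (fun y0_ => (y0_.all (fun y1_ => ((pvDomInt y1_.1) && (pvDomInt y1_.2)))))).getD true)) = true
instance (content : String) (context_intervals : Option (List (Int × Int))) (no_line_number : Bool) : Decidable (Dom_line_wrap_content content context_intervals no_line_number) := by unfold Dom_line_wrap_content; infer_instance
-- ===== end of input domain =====

-- B pairs lines with their numbers via one enumerate, selects pairs by recursive
-- per-interval slicing, and formats only at join time (alternative decomposition; same cost).

-- ===== PORT A =====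
def line_wrap_content (content : String) (context_intervals : Option (List (Int × Int))) (no_line_number : Bool) : String :=
  let lines := (PySem.Str.split? content "\n").getD []   -- sep "\n" ≠ "", so split? is always `some`
  let intervals : List (Int × Int) :=
    match context_intervals with
    | none => [(1, (lines.length : Int))]
    | some l => if l = [] then [(1, (lines.length : Int))] else l
  let new_lines : List String :=
    intervals.foldl (fun acc se =>
      (PySem.List.pyRange (max 0 (se.1 - 1)) (min (lines.length : Int) se.2) 1).foldl
        (fun acc i =>
          let pfx := if !no_line_number then PySem.Int.toStr (i + 1) ++ "|" else ""
          acc ++ [pfx ++ PySem.List.pyGetD lines i ""]) acc) []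
  PySem.Str.join "\n" new_lines

-- ===== PORT B =====
-- Source B's recursive `pick`: the clamped slice of the pair list per interval, front to back
def pvPick (pairs : List (Int × String)) : List (Int × Int) → List (Int × String)
  | [] => []
  | (s, e) :: rest =>
      PySem.List.slice pairs (some (max 0 (s - 1))) (some (max 0 (min (pairs.length : Int) e)))
        ++ pvPick pairs rest

def line_wrap_content_alt (content : String) (context_intervals : Option (List (Int × Int))) (no_line_number : Bool) : String :=
  let lines := (PySem.Str.split? content "\n").getD []
  let pairs := PySem.List.enumerate lines 1
  let chosen : List (Int × String) :=
    match context_intervals with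
    | none => pairs
    | some l => if l = [] then pairs else pvPick pairs l
  if no_line_number then
    PySem.Str.join "\n" (chosen.map (fun p => p.2))
  else
    PySem.Str.join "\n" (chosen.map (fun p => PySem.Int.toStr p.1 ++ "|" ++ p.2))

-- ===== PRECONDITION & SPEC =====
def Spec_line_wrap_content (content : String) (context_intervals : Option (List (Int × Int))) (no_line_number : Bool) (out : String) : Prop := out = line_wrap_content_alt content context_intervals no_line_number
instance (content : String) (context_intervals : Option (List (Int × Int))) (no_line_number : Bool) (out : String) : Decidable (Spec_line_wrap_content content context_intervals no_line_number out) := by unfold Spec_line_wrap_content; infer_instance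

-- ===== CLAIM =====
def Claim_equal_line_wrap_content : Prop := ∀ (content : String) (context_intervals : Option (List (Int × Int))) (no_line_number : Bool), Dom_line_wrap_content content context_intervals no_line_number → Spec_line_wrap_content content context_intervals no_line_number (line_wrap_content content context_intervals no_line_number)

-- ===== LEMMAS AND PROOFS =====

-- the indices of an interval, read off a list, form a clamped slice of that list
theorem pv_range_map_get_eq_slice {α : Type} (xs : List α) (d : α) (a b : Int)
    (ha : 0 ≤ a) (hb : b ≤ (xs.length : Int)) :
    (PySem.List.pyRange a b 1).map (fun i => PySem.List.pyGetD xs i d)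
      = PySem.List.slice xs (some a) (some (max 0 b)) := by
  rcases le_or_gt b a with h | h
  · rw [PySem.List.pyRange_one_eq_nil h, List.map_nil,
      PySem.List.slice_toNat xs ha (le_max_left 0 b)]
    have : (max 0 b).toNat - a.toNat = 0 := by omega
    rw [this, List.take_zero]
  · have hb0 : 0 ≤ b := le_of_lt (lt_of_le_of_lt ha h)
    rw [max_eq_right hb0, PySem.List.slice_toNat xs ha hb0]
    have hd := PySem.List.map_pyGetD_pyRange xs d ha
    rw [PySem.List.pyRange_one_append a b (PySem.List.len xs) h.le hb, List.map_append] at hd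
    rw [← hd]
    have hlen : (List.map (fun i => PySem.List.pyGetD xs i d) (PySem.List.pyRange a b 1)).length
        = b.toNat - a.toNat := by
      rw [List.length_map, PySem.List.length_pyRange_one]; omega
    rw [List.take_append_of_le_length (le_of_eq hlen.symm), ← hlen, List.take_length]

-- A's formatted inner-loop element, at an in-range index, is the formatting of B's pair there
theorem pv_fmt_eq (lines : List String) (nl : Bool) (g : Int × String → String)
    (hg : ∀ p, g p = (if !nl then PySem.Int.toStr p.1 ++ "|" else "") ++ p.2) (i : Int)
    (h0 : 0 ≤ i) (h1 : i < (lines.length : Int)) :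
    (if !nl then PySem.Int.toStr (i + 1) ++ "|" else "") ++ PySem.List.pyGetD lines i ""
      = g (PySem.List.pyGetD (PySem.List.enumerate lines 1) i (0, "")) := by
  have h1' : i < (((PySem.List.enumerate lines 1).length : Nat) : Int) := by
    simpa [PySem.List.length_enumerate] using h1
  rw [PySem.List.pyGetD_eq_getElem _ "" h0 h1,
    PySem.List.pyGetD_eq_getElem _ (0, "") h0 h1', PySem.List.getElem_enumerate, hg]
  have h2 : (1 : Int) + (i.toNat : Int) = i + 1 := by omega
  rw [h2]

-- per interval: A's formatted range equals the formatting of B's clamped slice of pairs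
theorem pv_interval_eq (lines : List String) (nl : Bool) (g : Int × String → String)
    (hg : ∀ p, g p = (if !nl then PySem.Int.toStr p.1 ++ "|" else "") ++ p.2) (s e : Int) :
    (PySem.List.pyRange (max 0 (s - 1)) (min (lines.length : Int) e) 1).map
        (fun i => (if !nl then PySem.Int.toStr (i + 1) ++ "|" else "") ++ PySem.List.pyGetD lines i "")
      = (PySem.List.slice (PySem.List.enumerate lines 1) (some (max 0 (s - 1)))
          (some (max 0 (min (lines.length : Int) e)))).map g := by
  have hlen : ((PySem.List.enumerate lines 1).length : Int) = (lines.length : Int) := by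
    simp [PySem.List.length_enumerate]
  rw [← pv_range_map_get_eq_slice (PySem.List.enumerate lines 1) (0, "") _ _
    (le_max_left 0 (s - 1)) (by rw [hlen]; exact min_le_left _ _), List.map_map]
  apply List.map_congr_left
  intro i hi
  rw [PySem.List.mem_pyRange_one] at hi
  exact pv_fmt_eq lines nl g hg i (le_trans (le_max_left 0 (s - 1)) hi.1)
    (lt_of_lt_of_le hi.2 (min_le_left _ _))

-- Source B's recursive `pick` is the flatMap of the clamped slices
theorem pv_pick_eq_flatMap (pairs : List (Int × String)) (l : List (Int × Int)) :
    pvPick pairs l = l.flatMap (fun se =>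
      PySem.List.slice pairs (some (max 0 (se.1 - 1)))
        (some (max 0 (min (pairs.length : Int) se.2)))) := by
  induction l with
  | nil => rfl
  | cons h t ih => cases h; simp [pvPick, ih]

theorem line_wrap_content_spec : Claim_equal_line_wrap_content := by
  intro content ci nl _
  unfold Spec_line_wrap_content line_wrap_content line_wrap_content_alt
  set lines := (PySem.Str.split? content "\n").getD [] with hlines
  have hplen : ((PySem.List.enumerate lines 1).length : Int) = (lines.length : Int) := by
    simp [PySem.List.length_enumerate]
  -- choose B's formatting function according to the branch
  obtain ⟨g, hg, hB⟩ : ∃ g : Int × String → String,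
      (∀ p, g p = (if !nl then PySem.Int.toStr p.1 ++ "|" else "") ++ p.2) ∧
      ∀ ch : List (Int × String),
        (if nl then PySem.Str.join "\n" (ch.map (fun p => p.2))
         else PySem.Str.join "\n" (ch.map (fun p => PySem.Int.toStr p.1 ++ "|" ++ p.2)))
          = PySem.Str.join "\n" (ch.map g) := by
    cases nl with
    | true => exact ⟨fun p => p.2, by simp, fun ch => by simp⟩
    | false => exact ⟨fun p => PySem.Int.toStr p.1 ++ "|" ++ p.2,
        by simp [String.append_assoc], fun ch => by simp⟩
  rw [hB]
  -- A's nested loops as a flatMap of formatted ranges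
  have hA : ∀ intervals : List (Int × Int),
      intervals.foldl (fun acc se =>
        (PySem.List.pyRange (max 0 (se.1 - 1)) (min (lines.length : Int) se.2) 1).foldl
          (fun acc i =>
            acc ++ [(if !nl then PySem.Int.toStr (i + 1) ++ "|" else "")
              ++ PySem.List.pyGetD lines i ""]) acc) []
      = intervals.flatMap (fun se =>
          (PySem.List.slice (PySem.List.enumerate lines 1) (some (max 0 (se.1 - 1)))
            (some (max 0 (min (lines.length : Int) se.2)))).map g) := by
    intro intervals
    have : intervals.foldl (fun acc se =>
        (PySem.List.pyRange (max 0 (se.1 - 1)) (min (lines.length : Int) se.2) 1).foldl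
          (fun acc i =>
            acc ++ [(if !nl then PySem.Int.toStr (i + 1) ++ "|" else "")
              ++ PySem.List.pyGetD lines i ""]) acc) []
        = intervals.foldl (fun acc se => acc ++
            (PySem.List.slice (PySem.List.enumerate lines 1) (some (max 0 (se.1 - 1)))
              (some (max 0 (min (lines.length : Int) se.2)))).map g) [] := by
      apply PySem.List.foldl_congr_mem
      intro acc se _
      rw [PySem.List.foldl_append_singleton_eq_map, pv_interval_eq lines nl g hg]
    rw [this, PySem.List.foldl_append_eq_flatMap, List.nil_append]
  -- the default interval selects all pairs
  have hdef : (PySem.List.slice (PySem.List.enumerate lines 1) (some (max 0 ((1 : Int) - 1)))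
      (some (max 0 (min (lines.length : Int) (lines.length : Int))))).map g
      = (PySem.List.enumerate lines 1).map g := by
    congr 1
    have h0 : (max 0 ((1 : Int) - 1)) = 0 := by omega
    have h1 : (max 0 (min (lines.length : Int) (lines.length : Int))) = (lines.length : Int) := by
      omega
    rw [h0, h1, PySem.List.slice_toNat _ le_rfl (Int.natCast_nonneg _)]
    simp [PySem.List.length_enumerate]
  cases ci with
  | none =>
    dsimp only
    rw [hA]
    simp only [List.flatMap_cons, List.flatMap_nil, List.append_nil]
    rw [hdef]
  | some l =>
    by_cases hl : l = []
    · subst hl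
      dsimp only
      rw [if_pos rfl, if_pos rfl, hA]
      simp only [List.flatMap_cons, List.flatMap_nil, List.append_nil]
      rw [hdef]
    · dsimp only
      rw [if_neg hl, if_neg hl, hA, pv_pick_eq_flatMap, ← List.map_flatMap]
      simp only [hplen]

-- ===== VERDICT =====
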